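-- pv_equiv track=rewrite | github.com/WillyWilsen/Tugas2-Kriptografi | src/2/service.py | find_key_length
-- ===== SOURCE A (Python) =====
-- def gcd(a, b):
--     while b:
--       a, b = b, a % b
--     return a
--
-- def find_key_length(indices):
--     distances = []
--     for i in range(len(indices) - 1):
--       for j in range(i + 1, len(indices)):
--         distances.append(abs(indices[i] - indices[j]))
--     key_length = distances[0]
--     for distance in distances[1:]:
--       key_length = gcd(key_length, distance)
--     return key_length
-- ===== SOURCE B (Python) =====
-- def find_key_length(indices):
--     def _gcd(a, b):
--         return a if b == 0 else _gcd(b, a % b)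
--     ref = indices[0]
--     g = 0
--     for x in indices[1:]:
--         g = _gcd(g, abs(x - ref))
--     return g
-- ===== Notes on version B (the rewrite author's own statement) =====
-- stated objective: faster
-- what changed: B takes the gcd of the differences from the single first element in one pass instead of building the quadratic list of all pairwise distances and folding gcd over it.
import Mathlib
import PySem

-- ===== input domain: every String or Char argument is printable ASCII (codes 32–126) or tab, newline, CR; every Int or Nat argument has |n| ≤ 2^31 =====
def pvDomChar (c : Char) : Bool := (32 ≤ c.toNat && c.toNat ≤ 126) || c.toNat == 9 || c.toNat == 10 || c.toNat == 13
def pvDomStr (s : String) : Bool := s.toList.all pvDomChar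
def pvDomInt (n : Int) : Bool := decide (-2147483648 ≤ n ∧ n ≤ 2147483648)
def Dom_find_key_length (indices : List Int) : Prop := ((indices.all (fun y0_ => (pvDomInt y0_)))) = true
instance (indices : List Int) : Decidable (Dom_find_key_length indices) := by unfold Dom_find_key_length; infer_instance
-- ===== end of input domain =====

-- B replaces A's quadratic all-pairs distance list by a single pass taking the gcd
-- of each element's difference from the first element (objective: faster).

-- ===== PORT A =====

-- termination fact for the Euclidean loop (Python `%` has the divisor's sign, so |a % b| < |b|)
theorem pvModNatAbsLt (a b : Int) (hb : b ≠ 0) : (PySem.Int.mod a b).natAbs < b.natAbs := by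
  rcases lt_or_gt_of_ne hb with h | h
  · have := PySem.Int.mod_neg_bounds a h; omega
  · have h1 := PySem.Int.mod_nonneg a h; have h2 := PySem.Int.mod_lt a h; omega

-- A's helper `gcd(a, b)`: the while loop as structural recursion on the same state
def pyGcd (a b : Int) : Int :=
  if hb : b = 0 then a else pyGcd b (PySem.Int.mod a b)
termination_by b.natAbs
decreasing_by exact pvModNatAbsLt a b hb

def find_key_length (indices : List Int) : Int :=
  let n : Int := (indices.length : Int)
  let distances : List Int :=
    (PySem.List.pyRange 0 (n - 1) 1).foldl (fun acc i =>
      (PySem.List.pyRange (i + 1) n 1).foldl (fun acc2 j =>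
        acc2 ++ [|PySem.List.pyGetD indices i 0 - PySem.List.pyGetD indices j 0|]) acc) []
  let key_length := PySem.List.pyGetD distances 0 0
  (PySem.List.slice distances (some 1) none).foldl (fun k d => pyGcd k d) key_length

-- ===== PORT B =====

-- B's helper `_gcd(a, b)`: recursive Euclid
def bGcd (a b : Int) : Int :=
  if hb : b = 0 then a else bGcd b (PySem.Int.mod a b)
termination_by b.natAbs
decreasing_by exact pvModNatAbsLt a b hb

def find_key_length_alt (indices : List Int) : Int :=
  let ref := PySem.List.pyGetD indices 0 0
  (PySem.List.slice indices (some 1) none).foldl (fun g x => bGcd g |x - ref|) 0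

-- ===== PRECONDITION & SPEC =====
-- Pre_ excludes lists of fewer than two elements, on which A raises IndexError
-- (the pairwise distance list is empty, so distances[0] fails).
def Pre_find_key_length (indices : List Int) : Prop := 2 ≤ indices.length
instance (indices : List Int) : Decidable (Pre_find_key_length indices) := by
  unfold Pre_find_key_length; infer_instance
def pvWitness_find_key_length : List Int := [2, 9, 23]

def Spec_find_key_length (indices : List Int) (out : Int) : Prop := out = find_key_length_alt indices
instance (indices : List Int) (out : Int) : Decidable (Spec_find_key_length indices out) := by
  unfold Spec_find_key_length; infer_instance

-- ===== CLAIM (what is proved, stated in full; the proofs are below) =====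
def Claim_equal_find_key_length : Prop := ∀ (indices : List Int), Dom_find_key_length indices → Pre_find_key_length indices → Spec_find_key_length indices (find_key_length indices)

-- ===== LEMMAS AND PROOFS =====

theorem gcd_rec_int (a b : Int) : Int.gcd b (a % b) = Int.gcd a b := by
  apply Nat.dvd_antisymm
  · have h1 : (↑(Int.gcd b (a % b)) : Int) ∣ b := Int.gcd_dvd_left b (a % b)
    have h2 : (↑(Int.gcd b (a % b)) : Int) ∣ a % b := Int.gcd_dvd_right b (a % b)
    have h3 := dvd_add h2 (h1.mul_right (a / b))
    rw [Int.emod_add_mul_ediv] at h3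
    exact Int.dvd_gcd h3 h1
  · have h1 : (↑(Int.gcd a b) : Int) ∣ a := Int.gcd_dvd_left a b
    have h2 : (↑(Int.gcd a b) : Int) ∣ b := Int.gcd_dvd_right a b
    have h3 := dvd_sub h1 (h2.mul_right (a / b))
    rw [Int.emod_def] at *
    exact Int.dvd_gcd h2 h3

-- the Euclidean loop computes the mathematical gcd on nonnegative inputs
theorem pyGcd_eq_gcd (b a : Int) (ha : 0 ≤ a) (hb : 0 ≤ b) :
    pyGcd a b = (Int.gcd a b : Int) := by
  by_cases h0 : b = 0
  · subst h0; rw [pyGcd]; simp [Int.gcd, Int.natAbs_of_nonneg ha]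
  · have hbpos : 0 < b := lt_of_le_of_ne hb (Ne.symm h0)
    have hmod : PySem.Int.mod a b = a % b := PySem.Int.mod_eq_emod_of_pos hbpos
    rw [pyGcd]
    simp only [h0, dite_false, hmod]
    rw [pyGcd_eq_gcd (a % b) b hb (Int.emod_nonneg a h0), gcd_rec_int]
termination_by b.natAbs
decreasing_by rw [← hmod]; exact pvModNatAbsLt a b h0

theorem bGcd_eq_pyGcd (b a : Int) : bGcd a b = pyGcd a b := by
  by_cases h0 : b = 0
  · subst h0; rw [bGcd, pyGcd]; simp
  · rw [bGcd, pyGcd]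
    simp only [h0, dite_false]
    exact bGcd_eq_pyGcd (PySem.Int.mod a b) b
termination_by b.natAbs
decreasing_by exact pvModNatAbsLt a b h0

-- fold of the Euclidean loop over a list of nonnegative ints, in ℕ
theorem foldl_pyGcd_eq (l : List Int) (a : Nat) (hl : ∀ x ∈ l, 0 ≤ x) :
    l.foldl pyGcd (a : Int) = (((l.map Int.natAbs).foldl Nat.gcd a : Nat) : Int) := by
  induction l generalizing a with
  | nil => simp
  | cons x t ih =>
    have hx : 0 ≤ x := hl x (List.mem_cons_self)
    have hstep : pyGcd (a : Int) x = ((Nat.gcd a x.natAbs : Nat) : Int) := by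
      rw [pyGcd_eq_gcd x (a : Int) (Int.natCast_nonneg a) hx]
      simp [Int.gcd]
    simp only [List.foldl_cons, List.map_cons, hstep]
    exact ih (Nat.gcd a x.natAbs) (fun y hy => hl y (List.mem_cons_of_mem x hy))

-- foldl of Nat.gcd versus the gcd of the list (foldr form)
theorem foldl_gcd_eq (l : List Nat) (a : Nat) :
    l.foldl Nat.gcd a = Nat.gcd a (l.foldr Nat.gcd 0) := by
  induction l generalizing a with
  | nil => simp
  | cons x t ih => simp only [List.foldl_cons, List.foldr_cons, ih, Nat.gcd_assoc]

theorem foldr_gcd_dvd {l : List Nat} {x : Nat} (hx : x ∈ l) : l.foldr Nat.gcd 0 ∣ x := by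
  induction l with
  | nil => cases hx
  | cons y t ih =>
    rcases List.mem_cons.mp hx with h | h
    · subst h; exact Nat.gcd_dvd_left _ _
    · exact dvd_trans (Nat.gcd_dvd_right _ _) (ih h)

theorem dvd_foldr_gcd {l : List Nat} {d : Nat} (h : ∀ x ∈ l, d ∣ x) : d ∣ l.foldr Nat.gcd 0 := by
  induction l with
  | nil => simp
  | cons y t ih =>
    exact Nat.dvd_gcd (h y List.mem_cons_self) (ih (fun x hx => h x (List.mem_cons_of_mem y hx)))

-- the distances list of A, in flatMap form
theorem distances_eq (xs : List Int) :
    ((PySem.List.pyRange 0 ((xs.length : Int) - 1) 1).foldl (fun acc i =>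
      (PySem.List.pyRange (i + 1) (xs.length : Int) 1).foldl (fun acc2 j =>
        acc2 ++ [|PySem.List.pyGetD xs i 0 - PySem.List.pyGetD xs j 0|]) acc) []) =
    (PySem.List.pyRange 0 ((xs.length : Int) - 1) 1).flatMap (fun i =>
      (PySem.List.pyRange (i + 1) (xs.length : Int) 1).map
        (fun j => |PySem.List.pyGetD xs i 0 - PySem.List.pyGetD xs j 0|)) := by
  simp only [PySem.List.foldl_append_singleton_eq_map]
  rw [PySem.List.foldl_append_eq_flatMap]
  simp

-- every member of A's distances list is |u - v| for members u v of xs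
theorem mem_distances {xs : List Int} {z : Int}
    (hz : z ∈ (PySem.List.pyRange 0 ((xs.length : Int) - 1) 1).flatMap (fun i =>
      (PySem.List.pyRange (i + 1) (xs.length : Int) 1).map
        (fun j => |PySem.List.pyGetD xs i 0 - PySem.List.pyGetD xs j 0|))) :
    ∃ u ∈ xs, ∃ v ∈ xs, z = |u - v| := by
  rcases List.mem_flatMap.mp hz with ⟨i, hi, hz2⟩
  rcases List.mem_map.mp hz2 with ⟨j, hj, hz3⟩
  rcases (PySem.List.mem_pyRange_one).mp hi with ⟨hi0, hi1⟩
  rcases (PySem.List.mem_pyRange_one).mp hj with ⟨hj0, hj1⟩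
  refine ⟨PySem.List.pyGetD xs i 0, PySem.List.pyGetD_mem xs 0 ?_,
    PySem.List.pyGetD xs j 0, PySem.List.pyGetD_mem xs 0 ?_, hz3.symm⟩
  · simp [PySem.Raise.InRange]; omega
  · simp [PySem.Raise.InRange]; omega

-- |x0 - y| is in A's distances list for every y in the tail
theorem tail_mem_distances {xs : List Int} (h2 : 2 ≤ xs.length) {k : Nat}
    (hk : k < xs.length - 1) :
    |PySem.List.pyGetD xs 0 0 - PySem.List.pyGetD xs ((k : Int) + 1) 0| ∈
    (PySem.List.pyRange 0 ((xs.length : Int) - 1) 1).flatMap (fun i =>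
      (PySem.List.pyRange (i + 1) (xs.length : Int) 1).map
        (fun j => |PySem.List.pyGetD xs i 0 - PySem.List.pyGetD xs j 0|)) := by
  apply List.mem_flatMap.mpr
  refine ⟨0, PySem.List.mem_pyRange_one.mpr ⟨le_refl _, by omega⟩, ?_⟩
  apply List.mem_map.mpr
  exact ⟨(k : Int) + 1, PySem.List.mem_pyRange_one.mpr ⟨by omega, by omega⟩, rfl⟩

-- GB divides every "tail difference", in ℤ
theorem int_dvd_of_mem_tail {xs : List Int} {r y : Int}
    (hy : y ∈ xs) (hh : xs.head? = some r) :
    ((((xs.tail.map (fun x => |x - r|)).map Int.natAbs).foldr Nat.gcd 0 : Nat) : Int) ∣ (y - r) := by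
  rcases xs with _ | ⟨h, t⟩
  · cases hh
  · simp only [List.head?_cons, Option.some_inj] at hh
    subst hh
    rcases List.mem_cons.mp hy with h1 | h1
    · subst h1; simp
    · have hz : (|y - h|).natAbs ∈ ((t.map (fun x => |x - h|)).map Int.natAbs) :=
        List.mem_map.mpr ⟨|y - h|, List.mem_map.mpr ⟨y, h1, rfl⟩, rfl⟩
      have hd := foldr_gcd_dvd hz
      have h2 : ((((t.map (fun x => |x - h|)).map Int.natAbs).foldr Nat.gcd 0 : Nat) : Int) ∣ |y - h| := by
        rw [← Int.natAbs_dvd_natAbs]; simpa using hd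
      simpa [List.tail_cons] using (dvd_abs _ _).mp h2

-- the two gcd'd lists: A's all-pairs distances and B's first-element differences
def pvRef (xs : List Int) : Int := PySem.List.pyGetD xs 0 0

def pvDA (xs : List Int) : List Int :=
  (PySem.List.pyRange 0 ((xs.length : Int) - 1) 1).flatMap (fun i =>
    (PySem.List.pyRange (i + 1) (xs.length : Int) 1).map
      (fun j => |PySem.List.pyGetD xs i 0 - PySem.List.pyGetD xs j 0|))

def pvDB (xs : List Int) : List Int := xs.tail.map (fun x => |x - pvRef xs|)

theorem head?_eq_ref {xs : List Int} (h2 : 2 ≤ xs.length) : xs.head? = some (pvRef xs) := by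
  rcases xs with _ | ⟨h, t⟩
  · simp at h2
  · simp [pvRef, PySem.List.pyGetD_zero]

-- the central identity: gcd of all pairwise distances = gcd of first-element differences
theorem gcd_DA_eq_DB (xs : List Int) (h2 : 2 ≤ xs.length) :
    ((pvDA xs).map Int.natAbs).foldr Nat.gcd 0 = ((pvDB xs).map Int.natAbs).foldr Nat.gcd 0 := by
  have hh := head?_eq_ref h2
  apply Nat.dvd_antisymm
  · -- GA ∣ GB: every first-element difference occurs among the pairwise distances
    apply dvd_foldr_gcd
    intro z hz
    rcases List.mem_map.mp hz with ⟨w, hw, rfl⟩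
    rcases List.mem_map.mp hw with ⟨x, hx, rfl⟩
    rcases List.mem_iff_getElem.mp hx with ⟨k, hk, hxk⟩
    have hklen : k < xs.length - 1 := by simpa [List.length_tail] using hk
    have hxe : PySem.List.pyGetD xs ((k : Int) + 1) 0 = x := by
      have : ((k : Int) + 1) = ((k + 1 : Nat) : Int) := by push_cast; ring
      rw [this, PySem.List.pyGetD_natCast]
      rw [← hxk, List.getElem_tail]
      exact List.getD_eq_getElem xs 0 (by omega)
    have hmem := tail_mem_distances h2 hklen
    rw [hxe] at hmem
    have hmem' : (|pvRef xs - x|).natAbs ∈ (pvDA xs).map Int.natAbs :=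
      List.mem_map.mpr ⟨|pvRef xs - x|, by simpa [pvDA, pvRef] using hmem, rfl⟩
    have hga := foldr_gcd_dvd hmem'
    have heq : (|pvRef xs - x|).natAbs = (|x - pvRef xs|).natAbs := by rw [abs_sub_comm]
    rw [heq] at hga
    exact hga
  · -- GB ∣ GA: every pairwise distance is a difference of two first-element differences
    apply dvd_foldr_gcd
    intro z hz
    rcases List.mem_map.mp hz with ⟨w, hw, rfl⟩
    rcases mem_distances hw with ⟨u, hu, v, hv, rfl⟩
    have hdu := int_dvd_of_mem_tail hu hh
    have hdv := int_dvd_of_mem_tail hv hh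
    have hdz : ((((xs.tail.map (fun x => |x - pvRef xs|)).map Int.natAbs).foldr Nat.gcd 0 : Nat) : Int) ∣ (u - v) := by
      have := dvd_sub hdu hdv
      simpa using this
    have := (Int.natAbs_dvd_natAbs).mpr ((dvd_abs _ _).mpr hdz)
    simpa [pvDB] using this

theorem mem_pvDA_nonneg {xs : List Int} {z : Int} (hz : z ∈ pvDA xs) : 0 ≤ z := by
  rcases mem_distances (by simpa [pvDA] using hz) with ⟨u, _, v, _, rfl⟩
  exact abs_nonneg _

theorem A_eq (xs : List Int) (h2 : 2 ≤ xs.length) :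
    find_key_length xs = (((pvDA xs).map Int.natAbs).foldr Nat.gcd 0 : Nat) := by
  obtain ⟨d, t, hDA⟩ : ∃ d t, pvDA xs = d :: t := by
    have hm := tail_mem_distances h2 (k := 0) (by omega)
    cases h : pvDA xs with
    | nil => unfold pvDA at h; rw [h] at hm; cases hm
    | cons d t => exact ⟨d, t, rfl⟩
  have hd0 : 0 ≤ d := mem_pvDA_nonneg (hDA ▸ List.mem_cons_self)
  have ht : ∀ x ∈ t, 0 ≤ x := fun x hx => mem_pvDA_nonneg (hDA ▸ List.mem_cons_of_mem d hx)
  simp only [find_key_length]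
  rw [distances_eq]
  have hfold : pvDA xs = (PySem.List.pyRange 0 ((xs.length : Int) - 1) 1).flatMap (fun i =>
      (PySem.List.pyRange (i + 1) (xs.length : Int) 1).map
        (fun j => |PySem.List.pyGetD xs i 0 - PySem.List.pyGetD xs j 0|)) := rfl
  rw [← hfold, hDA, PySem.List.slice_from_one, List.tail_cons, PySem.List.pyGetD_zero_cons]
  calc t.foldl (fun k d => pyGcd k d) d
      = t.foldl pyGcd ((d.natAbs : Nat) : Int) := by rw [Int.natAbs_of_nonneg hd0]
    _ = (((t.map Int.natAbs).foldl Nat.gcd d.natAbs : Nat) : Int) := foldl_pyGcd_eq t d.natAbs ht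
    _ = ((Nat.gcd d.natAbs ((t.map Int.natAbs).foldr Nat.gcd 0) : Nat) : Int) := by rw [foldl_gcd_eq]
    _ = ((((d :: t).map Int.natAbs).foldr Nat.gcd 0 : Nat) : Int) := by simp

theorem B_eq (xs : List Int) :
    find_key_length_alt xs = (((pvDB xs).map Int.natAbs).foldr Nat.gcd 0 : Nat) := by
  simp only [find_key_length_alt]
  rw [PySem.List.slice_from_one]
  simp only [bGcd_eq_pyGcd]
  have h1 : xs.tail.foldl (fun g x => pyGcd g |x - PySem.List.pyGetD xs 0 0|) 0 =
      (xs.tail.map (fun x => |x - pvRef xs|)).foldl pyGcd 0 := by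
    rw [List.foldl_map]; rfl
  rw [h1]
  have h0 : (0 : Int) = ((0 : Nat) : Int) := rfl
  rw [h0, foldl_pyGcd_eq _ 0 (by intro x hx; rcases List.mem_map.mp hx with ⟨y, _, rfl⟩; exact abs_nonneg _)]
  rw [foldl_gcd_eq, Nat.gcd_zero_left]
  rfl

-- ===== VERDICT (by name: the statement is the Claim_ definition above) =====
theorem find_key_length_spec : Claim_equal_find_key_length := by
  intro xs _ hpre
  have h2 : 2 ≤ xs.length := hpre
  unfold Spec_find_key_length
  rw [A_eq xs h2, B_eq xs, gcd_DA_eq_DB xs h2]
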